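-- pv_equiv track=rewrite | github.com/ruanramos/studies | Hackerrank/acm-icpc-team.py | combValue
-- ===== SOURCE A (Python) =====
-- def combValue(comb):
--     a = []
--     for i in range(len(comb[0])):
--         if comb[0][i] == '1' or comb[1][i] == '1':
--             a.append('1')
--         else:
--             a.append('0')
--     return a.count('1')
-- ===== SOURCE B (Python) =====
-- def combValue(comb):
--     n = len(comb[0])
--     m0 = 0
--     for c in comb[0]:
--         m0 = m0 * 2 + (c == '1')
--     m1 = 0
--     for c in comb[1][:n]:
--         m1 = m1 * 2 + (c == '1')
--     return (m0 | m1).bit_count()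
-- ===== Notes on version B (the rewrite author's own statement) =====
-- stated objective: alternative
-- what changed: Interprets each bit string as a binary integer (accumulating m = 2*m + (c=='1')), ORs the two integers and returns the popcount of the combined value, instead of A's per-position pass that appends '1'/'0' chars to a list and counts them.
-- outside the precondition, e.g. on combValue(('011', '10')): A returns 3, B returns 2
import Mathlib
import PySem

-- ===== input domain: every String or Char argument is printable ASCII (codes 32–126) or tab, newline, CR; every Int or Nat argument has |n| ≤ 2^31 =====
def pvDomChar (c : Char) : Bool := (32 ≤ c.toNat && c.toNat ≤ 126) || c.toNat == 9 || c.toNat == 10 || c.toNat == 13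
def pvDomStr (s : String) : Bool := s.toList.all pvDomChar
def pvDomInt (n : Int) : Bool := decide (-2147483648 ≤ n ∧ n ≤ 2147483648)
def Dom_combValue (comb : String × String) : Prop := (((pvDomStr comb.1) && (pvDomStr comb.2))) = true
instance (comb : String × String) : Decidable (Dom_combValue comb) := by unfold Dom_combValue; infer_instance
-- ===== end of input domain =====

-- B interprets the two bit strings as binary integers, ORs them and takes the popcount,
-- instead of A's positional pass building a '1'/'0' list and counting (objective: alternative).

-- ===== PORT A =====
def combValue (comb : String × String) : Int :=
  let a : List Char :=
    (PySem.List.pyRange 0 (PySem.Str.len comb.1) 1).foldl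
      (fun a i =>
        if PySem.List.pyGetD comb.1.toList i ' ' = '1' ∨
           PySem.List.pyGetD comb.2.toList i ' ' = '1'
        then a ++ ['1'] else a ++ ['0'])
      []
  PySem.List.count a '1'

-- ===== PORT B =====
def combValue_alt (comb : String × String) : Int :=
  let n : Int := PySem.Str.len comb.1
  let m0 : Int := comb.1.toList.foldl (fun m c => m * 2 + (if c = '1' then 1 else 0)) 0
  let m1 : Int := (PySem.List.slice comb.2.toList none (some n)).foldl
      (fun m c => m * 2 + (if c = '1' then 1 else 0)) 0
  (PySem.Int.bitCount (PySem.Int.bor m0 m1) : Int)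

-- ===== PRECONDITION & SPEC =====
-- Pre_ requires comb[1] to be at least as long as comb[0]: on a shorter comb[1] A usually raises
-- IndexError, and where it still returns (every position of comb[0] beyond comb[1] holds '1',
-- thanks to `or` short-circuiting) B's right-aligned integer OR may pair different positions
-- than A's left-aligned indexed scan, so those unequal-length corners are excluded.
def Pre_combValue (comb : String × String) : Prop :=
  comb.1.toList.length ≤ comb.2.toList.length
instance (comb : String × String) : Decidable (Pre_combValue comb) := by
  unfold Pre_combValue; infer_instance
def pvWitness_combValue : (String × String) := ("1010", "1100")

def Spec_combValue (comb : String × String) (out : Int) : Prop := out = combValue_alt comb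
instance (comb : String × String) (out : Int) : Decidable (Spec_combValue comb out) := by
  unfold Spec_combValue; infer_instance

-- ===== CLAIM (what is proved, stated in full; the proofs are below) =====
def Claim_equal_combValue : Prop :=
  ∀ (comb : String × String), Dom_combValue comb → Pre_combValue comb →
    Spec_combValue comb (combValue comb)
-- ===== LEMMAS AND PROOFS =====

-- the bit of one character, and the value of a bit-string read LSB-first
def pvBit (c : Char) : Nat := if c = '1' then 1 else 0
def pvValR : List Char → Nat
  | [] => 0
  | c :: cs => pvBit c + 2 * pvValR cs

theorem pvValR_append_singleton (l : List Char) (c : Char) :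
    pvValR (l ++ [c]) = pvValR l + 2 ^ l.length * pvBit c := by
  induction l with
  | nil => simp [pvValR]
  | cons x xs ih => simp [pvValR, ih, pow_succ]; ring

-- B's MSB-first Int fold computes pvValR of the reversed list
theorem foldl_int_eq_valR (l : List Char) (a : Nat) :
    l.foldl (fun m c => m * 2 + (if c = '1' then 1 else 0)) (a : Int)
      = ((a * 2 ^ l.length + pvValR l.reverse : Nat) : Int) := by
  induction l generalizing a with
  | nil => simp [pvValR]
  | cons x xs ih =>
    have hstep : ((a : Int) * 2 + (if x = '1' then 1 else 0))
        = ((a * 2 + pvBit x : Nat) : Int) := by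
      by_cases h : x = '1' <;> simp [pvBit, h] <;> push_cast <;> ring
    simp only [List.foldl_cons, hstep, ih, List.reverse_cons, pvValR_append_singleton]
    push_cast
    simp [List.length_reverse, pow_succ]
    ring

-- OR at the bit level: (p + 2u) ||| (q + 2v) = (p ||| q) + 2 (u ||| v) for bits p q
theorem lor_bit_step (p q : Bool) (u v : Nat) :
    ((if p then 1 else 0) + 2*u) ||| ((if q then 1 else 0) + 2*v)
      = ((if (p || q) then 1 else 0) + 2*(u ||| v)) := by
  have := Nat.bitwise_bit (f := or) (a := p) (m := u) (b := q) (n := v)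
  cases p <;> cases q <;> simpa [Nat.bit, Nat.lor, Nat.add_comm] using this

-- popcount of a bit plus twice a value
theorem pvBitCount_step (r w : Nat) (hr : r ≤ 1) :
    PySem.Int.bitCount ((r + 2*w : Nat) : Int) = r + PySem.Int.bitCount ((w : Nat) : Int) := by
  by_cases hm : r + 2*w = 0
  · have h0 : r = 0 ∧ w = 0 := by omega
    simp [h0.1, h0.2, PySem.Int.bitCount_zero]
  · rw [PySem.Int.bitCount_natCast (by omega)]
    have h1 : (r + 2*w) % 2 = r := by omega
    have h2 : (r + 2*w) / 2 = w := by omega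
    rw [h1, h2]

-- popcount of the OR of two equal-length bit strings counts the positions where either is '1'
theorem bitCount_lor_valR (a b : List Char) (h : a.length = b.length) :
    PySem.Int.bitCount ((pvValR a ||| pvValR b : Nat) : Int)
      = ((a.zip b).countP (fun p => p.1 = '1' ∨ p.2 = '1') : Int) := by
  induction a generalizing b with
  | nil =>
    cases b with
    | nil => simp [pvValR, PySem.Int.bitCount_zero]
    | cons y ys => simp at h
  | cons x xs ih =>
    cases b with
    | nil => simp at h
    | cons y ys =>
      have hlen : xs.length = ys.length := by simpa using h
      have hixN : (PySem.Int.bitCount ((pvValR xs ||| pvValR ys : Nat) : Int) : Int)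
          = ((xs.zip ys).countP (fun p => p.1 = '1' ∨ p.2 = '1') : Int) := ih ys hlen
      have hvx : pvValR (x :: xs) = (if decide (x = '1') then 1 else 0) + 2 * pvValR xs := by
        simp [pvValR, pvBit]
      have hvy : pvValR (y :: ys) = (if decide (y = '1') then 1 else 0) + 2 * pvValR ys := by
        simp [pvValR, pvBit]
      rw [hvx, hvy, lor_bit_step, pvBitCount_step _ _ (by split <;> omega),
          List.zip_cons_cons, List.countP_cons]
      push_cast
      rw [hixN]
      by_cases h1 : x = '1' <;> by_cases h2 : y = '1' <;> simp [h1, h2] <;> ring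

theorem count_fold_eq_sum (zs : List (Char × Char)) (acc : List Char) :
    PySem.List.count
      (zs.foldl (fun a p => if p.1 = '1' ∨ p.2 = '1' then a ++ ['1'] else a ++ ['0']) acc) '1'
    = PySem.List.count acc '1'
      + (zs.map (fun p => if p.1 = '1' ∨ p.2 = '1' then (1 : Int) else 0)).sum := by
  induction zs generalizing acc with
  | nil => simp
  | cons p zs ih =>
    simp only [List.foldl_cons, List.map_cons, List.sum_cons, ih]
    by_cases h : p.1 = '1' ∨ p.2 = '1' <;>
      simp [h, PySem.List.count, List.count_append] <;> ring

-- A equals the 0/1-sum over the zipped strings (A's loop characterisation)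
theorem combValue_eq_zip_sum (comb : String × String)
    (hpre : comb.1.toList.length ≤ comb.2.toList.length) :
    combValue comb
      = ((comb.1.toList.zip comb.2.toList).map
          (fun p => if p.1 = '1' ∨ p.2 = '1' then (1 : Int) else 0)).sum := by
  unfold combValue
  set s0 := comb.1.toList with hs0
  set s1 := comb.2.toList with hs1
  have hzlen : (s0.zip s1).length = s0.length := by
    simp [List.length_zip]; omega
  have hcongr :
      (PySem.List.pyRange 0 (PySem.Str.len comb.1) 1).foldl
        (fun a i =>
          if PySem.List.pyGetD s0 i ' ' = '1' ∨ PySem.List.pyGetD s1 i ' ' = '1'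
          then a ++ ['1'] else a ++ ['0']) []
      = (PySem.List.pyRange 0 ((s0.zip s1).length : Int) 1).foldl
        (fun a i =>
          (fun (a : List Char) (p : Char × Char) =>
            if p.1 = '1' ∨ p.2 = '1' then a ++ ['1'] else a ++ ['0'])
          a (PySem.List.pyGetD (s0.zip s1) i (' ', ' '))) [] := by
    have hlen0 : PySem.Str.len comb.1 = (s0.length : Int) := by
      simp [PySem.Str.len_eq, hs0]
    rw [hlen0, ← hzlen]
    apply PySem.List.foldl_congr_mem
    intro acc i hi
    have hi' := (PySem.List.mem_pyRange_one).1 hi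
    have h0 : 0 ≤ i := hi'.1
    have hiz : i < ((s0.zip s1).length : Int) := hi'.2
    have hi0 : i.toNat < (s0.zip s1).length := by omega
    have hi1 : i.toNat < s0.length := by omega
    have hi2 : i.toNat < s1.length := by omega
    rw [PySem.List.pyGetD_eq_getElem s0 ' ' h0 (by exact_mod_cast by omega),
        PySem.List.pyGetD_eq_getElem s1 ' ' h0 (by exact_mod_cast by omega),
        PySem.List.pyGetD_eq_getElem (s0.zip s1) (' ', ' ') h0 (by exact_mod_cast by omega)]
    simp [List.getElem_zip]
  rw [hcongr, PySem.List.foldl_pyRange_zero_pyGetD' (s0.zip s1) (' ', ' ')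
      (fun (a : List Char) (p : Char × Char) =>
        if p.1 = '1' ∨ p.2 = '1' then a ++ ['1'] else a ++ ['0']) [],
      count_fold_eq_sum]
  simp [PySem.List.count]


theorem zip_take_right (l1 l2 : List Char) :
    l1.zip (l2.take l1.length) = l1.zip l2 := by
  induction l1 generalizing l2 with
  | nil => simp
  | cons x xs ih => cases l2 <;> simp [ih]

-- ===== VERDICT (by name: the statement is the Claim_ definition above) =====
theorem combValue_spec : Claim_equal_combValue := by
  intro comb _ hpre
  unfold Spec_combValue
  simp only [combValue_alt]
  set s0 := comb.1.toList with hs0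
  set s1 := comb.2.toList with hs1
  have hlen : s0.length ≤ s1.length := hpre
  have hn : PySem.Str.len comb.1 = ((s0.length : Nat) : Int) := by
    simp [PySem.Str.len_eq, hs0]
  rw [hn, PySem.List.slice_to_natCast]
  set t := s1.take s0.length with ht
  have htlen : t.length = s0.length := by
    rw [ht, List.length_take]; omega
  have hm0 := foldl_int_eq_valR s0 0
  have hm1 := foldl_int_eq_valR t 0
  simp only [Nat.cast_zero] at hm0 hm1
  rw [hm0, hm1]
  simp only [Nat.zero_mul, Nat.zero_add, PySem.Int.bor_natCast]
  have hrevlen : s0.reverse.length = t.reverse.length := by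
    simp [htlen]
  rw [bitCount_lor_valR s0.reverse t.reverse hrevlen]
  have hzrev : s0.reverse.zip t.reverse = (s0.zip t).reverse := by
    have := List.reverse_zipWith (f := Prod.mk) (l := s0) (l' := t) (by omega)
    simpa [List.zip] using this.symm
  rw [hzrev, List.countP_reverse, zip_take_right s0 s1,
      combValue_eq_zip_sum comb hpre]
  rw [PySem.List.sum_map_ite_one_zero' (fun p => p.1 = '1' ∨ p.2 = '1') (s0.zip s1)]
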